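-- pv_equiv track=rewrite | github.com/basilwong/coding-problems | hackerrank/python/easy/algorithms/greedy/priyanka_and_toys.py | toys2
-- ===== SOURCE A (Python) =====
-- def toys2(w):
--
--     hashset = set(w)
--     count = 0
--     max_w = max(w)
--
--     i = 0
--     while i <= max_w:
--         if i in hashset:
--             count += 1
--             i += 4
--         i += 1
--     return count
-- ===== SOURCE B (Python) =====
-- def toys2(w):
--     count = 0
--     limit = -1  # A scans upward from 0, so weights below 0 are never counted
--     for x in sorted(set(w)):
--         if x > limit:
--             count += 1
--             limit = x + 4
--     return count
-- ===== Notes on version B (the rewrite author's own statement) =====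
-- stated objective: alternative
-- what changed: Replaces A's membership scan over every integer 0..max(w) with a single greedy fold over sorted(set(w)) that opens a new container whenever a weight exceeds the current limit (initial limit -1, matching A's scan start at 0); measured ~1.2x on the generated inputs, not the 1.5x needed to call it faster.
import Mathlib
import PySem

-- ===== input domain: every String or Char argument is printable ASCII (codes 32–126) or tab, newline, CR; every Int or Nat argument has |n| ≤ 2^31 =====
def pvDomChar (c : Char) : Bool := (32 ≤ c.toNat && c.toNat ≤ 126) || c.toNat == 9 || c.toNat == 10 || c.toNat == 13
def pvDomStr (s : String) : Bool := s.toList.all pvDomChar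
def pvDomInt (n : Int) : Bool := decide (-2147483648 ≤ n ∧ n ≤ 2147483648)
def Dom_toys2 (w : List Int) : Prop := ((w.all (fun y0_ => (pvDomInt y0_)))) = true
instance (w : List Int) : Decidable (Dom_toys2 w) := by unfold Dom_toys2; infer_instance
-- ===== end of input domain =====

-- B replaces A's integer-by-integer membership scan from 0 to max(w) by one greedy pass
-- over sorted(set(w)); equivalence is proved on all nonempty lists.

-- ===== PORT A =====
def toys2Loop (s : PySem.Set Int) (maxw : Int) (i : Int) (count : Int) : Int :=
  if i ≤ maxw then
    if PySem.Set.contains s i then toys2Loop s maxw (i + 5) (count + 1)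
    else toys2Loop s maxw (i + 1) count
  else count
termination_by (maxw + 1 - i).toNat
decreasing_by all_goals omega

def toys2 (w : List Int) : Int :=
  match PySem.List.max? w (fun x => x) with
  | none => 0  -- Python raises ValueError here (max of empty w); excluded by Pre_toys2
  | some m => toys2Loop (PySem.Set.ofList w) m 0 0

-- ===== PORT B =====
def altStep (st : Int × Int) (x : Int) : Int × Int :=
  if st.2 < x then (st.1 + 1, x + 4) else st

def toys2_alt (w : List Int) : Int :=
  ((PySem.List.sorted (PySem.Set.ofList w) (fun x => x) false).foldl altStep
    ((0 : Int), (-1 : Int))).1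

-- ===== PRECONDITION & SPEC =====
-- Pre_ excludes only the empty list, on which A raises ValueError (max of empty sequence).
def Pre_toys2 (w : List Int) : Prop := w ≠ []
instance (w : List Int) : Decidable (Pre_toys2 w) := by unfold Pre_toys2; infer_instance
def pvWitness_toys2 : List Int := [1, 2, 3, 17, 10]

def Spec_toys2 (w : List Int) (out : Int) : Prop := out = toys2_alt w
instance (w : List Int) (out : Int) : Decidable (Spec_toys2 w out) := by unfold Spec_toys2; infer_instance

-- ===== CLAIM (what is proved, stated in full; the proofs are below) =====
def Claim_equal_toys2 : Prop := ∀ (w : List Int), Dom_toys2 w → Pre_toys2 w → Spec_toys2 w (toys2 w)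

-- ===== LEMMAS AND PROOFS =====

-- abstract greedy count on a list: both ports are reduced to this
def greedyCount : List Int → Int
  | [] => 0
  | x :: r => 1 + greedyCount (r.dropWhile (fun y => decide (y ≤ x + 4)))
termination_by l => l.length
decreasing_by
  have := List.length_dropWhile_le (fun y => decide (y ≤ x + 4)) r
  simp only [List.length_cons]
  omega

lemma dropWhile_head_false {α : Type} {p : α → Bool} {a : α} {t : List α} :
    ∀ l : List α, l.dropWhile p = a :: t → p a = false := by
  intro l
  induction l with
  | nil => simp [List.dropWhile]
  | cons b r ih =>
    simp only [List.dropWhile]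
    by_cases hb : p b
    · simp [hb]; exact ih
    · simp [hb]; rintro rfl _; simpa using hb

lemma dropWhile_dropWhile_of_imp {α : Type} {p q : α → Bool} (h : ∀ x, p x = true → q x = true) :
    ∀ l : List α, (l.dropWhile p).dropWhile q = l.dropWhile q := by
  intro l
  induction l with
  | nil => rfl
  | cons a t ih =>
    by_cases ha : p a
    · simp [List.dropWhile, ha, h a ha, ih]
    · simp [List.dropWhile, ha]

lemma sorted_dropWhile_mem {L : List Int} (hs : L.Pairwise (· < ·)) {i : Int} (h : i ∈ L) :
    ∃ t, L.dropWhile (fun x => decide (x < i)) = i :: t := by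
  induction L with
  | nil => simp at h
  | cons a r ih =>
    rcases List.pairwise_cons.mp hs with ⟨ha, hr⟩
    rcases List.mem_cons.mp h with rfl | hir
    · exact ⟨r, by simp [List.dropWhile]⟩
    · have hai : a < i := ha i hir
      rcases ih hr hir with ⟨t, ht⟩
      exact ⟨t, by simp [List.dropWhile, hai]; exact ht⟩

lemma loop_eq_greedy (w : List Int) (m : Int) (L : List Int)
    (hL : L = PySem.List.sorted (PySem.Set.ofList w) (fun x => x) false)
    (hm : ∀ x ∈ w, x ≤ m) :
    ∀ (n : ℕ) (i c : Int), (m + 1 - i).toNat ≤ n →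
      toys2Loop (PySem.Set.ofList w) m i c
        = c + greedyCount (L.dropWhile (fun x => decide (x < i))) := by
  have hmemL : ∀ x, x ∈ L ↔ x ∈ w := by
    intro x
    rw [hL, PySem.List.mem_sorted _ _ _ _, PySem.Set.mem_ofList _ _]
  have hpw : L.Pairwise (· < ·) := hL ▸ PySem.List.sorted_ofList_pairwise_lt w
  intro n
  induction n with
  | zero =>
    intro i c hn
    have hi : ¬ i ≤ m := by omega
    have hnil : L.dropWhile (fun x => decide (x < i)) = [] := by
      rw [List.dropWhile_eq_nil_iff]
      intro x hx
      have := hm x ((hmemL x).mp hx)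
      simp; omega
    rw [toys2Loop, if_neg hi, hnil]
    simp [greedyCount]
  | succ n ih =>
    intro i c hn
    by_cases hi : i ≤ m
    · rw [toys2Loop, if_pos hi]
      by_cases hc : PySem.Set.contains (PySem.Set.ofList w) i = true
      · have hiw : i ∈ w := (PySem.Set.mem_ofList _ _).mp ((PySem.Set.contains_iff _ _).mp hc)
        have hiL : i ∈ L := (hmemL i).mpr hiw
        rcases sorted_dropWhile_mem hpw hiL with ⟨t, ht⟩
        rw [hc, if_pos rfl, ih (i + 5) (c + 1) (by omega)]
        have h55 : L.dropWhile (fun x => decide (x < i + 5))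
            = t.dropWhile (fun y => decide (y ≤ i + 4)) := by
          rw [← dropWhile_dropWhile_of_imp (p := fun x => decide (x < i))
              (q := fun x => decide (x < i + 5)) (by intro x hx; simp at *; omega) L, ht]
          have : (fun x : Int => decide (x < i + 5)) = (fun y : Int => decide (y ≤ i + 4)) := by
            funext y; simp only [decide_eq_decide]; omega
          simp [List.dropWhile, this]
        rw [h55, ht, greedyCount]
        ring
      · have hc' : PySem.Set.contains (PySem.Set.ofList w) i = false := by
          simpa using hc
        have hiL : i ∉ L := by
          intro hmem
          exact hc ((PySem.Set.contains_iff _ _).mpr ((PySem.Set.mem_ofList _ _).mpr ((hmemL i).mp hmem)))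
        rw [hc', if_neg (by simp), ih (i + 1) c (by omega)]
        have h1 : L.dropWhile (fun x => decide (x < i + 1))
            = L.dropWhile (fun x => decide (x < i)) := by
          rw [← dropWhile_dropWhile_of_imp (p := fun x => decide (x < i))
              (q := fun x => decide (x < i + 1)) (by intro x hx; simp at *; omega) L]
          cases hD : L.dropWhile (fun x => decide (x < i)) with
          | nil => rfl
          | cons a t =>
            have hap : ¬ (a < i) := by
              have := dropWhile_head_false (p := fun x => decide (x < i)) L hD
              simpa using this
            have haL : a ∈ L := (List.dropWhile_sublist _).mem (hD ▸ List.mem_cons_self ..)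
            have hne : a ≠ i := fun h => hiL (h ▸ haL)
            have : ¬ (a < i + 1) := by omega
            simp [List.dropWhile, this]
        rw [h1]
    · have hnil : L.dropWhile (fun x => decide (x < i)) = [] := by
        rw [List.dropWhile_eq_nil_iff]
        intro x hx
        have := hm x ((hmemL x).mp hx)
        simp; omega
      rw [toys2Loop, if_neg hi, hnil]
      simp [greedyCount]

lemma foldl_altStep :
    ∀ (L : List Int) (c l : Int),
      (L.foldl altStep (c, l)).1 = c + greedyCount (L.dropWhile (fun y => decide (y ≤ l))) := by
  intro L
  induction L with
  | nil => intro c l; simp [greedyCount]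
  | cons a t ih =>
    intro c l
    by_cases ha : a ≤ l
    · have : altStep (c, l) a = (c, l) := by
        simp [altStep]; omega
      rw [List.foldl_cons, this, ih c l]
      simp [List.dropWhile, ha]
    · have hla : l < a := by omega
      have : altStep (c, l) a = (c + 1, a + 4) := by
        simp [altStep, hla]
      rw [List.foldl_cons, this, ih (c + 1) (a + 4)]
      have hd : (a :: t).dropWhile (fun y => decide (y ≤ l)) = a :: t := by
        simp [List.dropWhile, ha]
      rw [hd, greedyCount]
      ring

-- ===== VERDICT (by name: the statement is the Claim_ definition above) =====
theorem toys2_spec : Claim_equal_toys2 := by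
  intro w _ hne
  unfold Spec_toys2
  set L := PySem.List.sorted (PySem.Set.ofList w) (fun x => x) false with hL
  rcases hM : PySem.List.max? w (fun x => x) with _ | m
  · exact absurd ((PySem.List.max?_eq_none_iff _ _).mp hM) hne
  · have hm : ∀ x ∈ w, x ≤ m := by
      intro x hx
      exact PySem.List.max?_isMax hM x hx
    have hpred : (fun y : Int => decide (y ≤ -1)) = (fun x : Int => decide (x < 0)) := by
      funext y; simp only [decide_eq_decide]; omega
    unfold toys2_alt toys2
    rw [hM, foldl_altStep L 0 (-1), hpred]
    exact (loop_eq_greedy w m L hL hm (m + 1).toNat 0 0 (by omega)).trans (by ring_nf)
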